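-- pv_equiv track=rewrite | github.com/1996JCZhou/Fully-Connected-MLP--Digits-Recognization | Net_algo.py | find_same_element
-- ===== SOURCE A (Python) =====
-- def find_same_element(data):
--     output_list = []
--     for i in range(len(data)-1):
--         for k in range(i+1, len(data)):
--             for j in data[i]:
--                 if j in data[k] and j not in output_list:
--                     output_list.append(j)
--     return output_list
-- ===== SOURCE B (Python) =====
-- def find_same_element(data):
--     # One pass: for each value record (first containing sublist s1, position there,
--     # second distinct containing sublist s2); then sort candidates by (s1, s2, pos).
--     info = {}
--     for idx, sub in enumerate(data):
--         for pos, x in enumerate(sub):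
--             if x not in info:
--                 info[x] = (idx, pos, None)
--             else:
--                 s1, p1, s2 = info[x]
--                 if s2 is None and idx != s1:
--                     info[x] = (s1, p1, idx)
--     cands = [(s1, s2, p1, x) for x, (s1, p1, s2) in info.items() if s2 is not None]
--     cands.sort(key=lambda t: (t[0], t[1], t[2]))
--     return [t[3] for t in cands]
-- ===== Notes on version B (the rewrite author's own statement) =====
-- stated objective: faster
-- what changed: A scans every pair of sublists with a quadratic duplicate check on the output; B makes one pass recording for each value its first two containing sublists and first position, then sorts the candidates by (first sublist, second sublist, position), which is exactly A's discovery order.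
import Mathlib
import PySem

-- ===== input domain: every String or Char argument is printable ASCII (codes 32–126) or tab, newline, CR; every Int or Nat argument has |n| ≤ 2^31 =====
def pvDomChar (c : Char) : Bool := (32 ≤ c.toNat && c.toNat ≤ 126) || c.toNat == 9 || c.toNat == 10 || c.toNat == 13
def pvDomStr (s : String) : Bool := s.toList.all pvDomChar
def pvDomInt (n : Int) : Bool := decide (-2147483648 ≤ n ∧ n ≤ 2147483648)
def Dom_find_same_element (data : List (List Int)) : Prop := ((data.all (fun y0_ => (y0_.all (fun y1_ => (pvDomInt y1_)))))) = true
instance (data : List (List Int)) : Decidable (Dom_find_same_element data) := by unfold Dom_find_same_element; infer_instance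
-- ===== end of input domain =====

-- B replaces A's triple nested loop by one indexing pass plus a sort of the candidates
-- by (first sublist, second sublist, position); proved to return A's exact list.

-- ===== PORT A =====
def find_same_element (data : List (List Int)) : List Int :=
  (PySem.List.pyRange 0 ((PySem.List.len data) - 1) 1).foldl (fun output_list i =>
    (PySem.List.pyRange (i + 1) (PySem.List.len data) 1).foldl (fun output_list k =>
      (PySem.List.pyGetD data i []).foldl (fun output_list j =>
        if j ∈ PySem.List.pyGetD data k [] ∧ j ∉ output_list then output_list ++ [j]
        else output_list) output_list) output_list) []

-- ===== PORT B =====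
def find_same_element_alt (data : List (List Int)) : List Int :=
  let info : PySem.Dict Int (Int × Int × Option Int) :=
    (PySem.List.enumerate data 0).foldl (fun info p =>
      (PySem.List.enumerate p.2 0).foldl (fun info q =>
        match info.get? q.2 with
        | none => info.insert q.2 (p.1, q.1, none)
        | some r => if r.2.2 = none ∧ p.1 ≠ r.1 then info.insert q.2 (r.1, r.2.1, some p.1) else info)
        info) PySem.Dict.empty
  let cands : List (Int × Int × Int × Int) := info.items.filterMap (fun r =>
    match r with
    | (x, (s1, p1, some s2)) => some (s1, s2, p1, x)
    | _ => none)
  (PySem.List.sorted cands (fun t => toLex (t.1, toLex (t.2.1, t.2.2.1))) false).map (fun t => t.2.2.2)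

-- ===== PRECONDITION & SPEC =====
def Spec_find_same_element (data : List (List Int)) (out : List Int) : Prop := out = find_same_element_alt data
instance (data : List (List Int)) (out : List Int) : Decidable (Spec_find_same_element data out) := by unfold Spec_find_same_element; infer_instance

-- ===== CLAIM (what is proved, stated in full; the proofs are below) =====
def Claim_equal_find_same_element : Prop := ∀ (data : List (List Int)), Dom_find_same_element data → Spec_find_same_element data (find_same_element data)

-- ===== LEMMAS AND PROOFS =====

/- ---------- shared notions ---------- -/

/-- event: ((i,k,p), value data[i][p], sublist data[k]). -/
abbrev Ev : Type := (Nat × Nat × Nat) × Int × List Int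

/-- strict lexicographic order on (i,k,p) keys. -/
def kLtb (u v : Nat × Nat × Nat) : Bool :=
  u.1 < v.1 || (u.1 == v.1 && (u.2.1 < v.2.1 || (u.2.1 == v.2.1 && u.2.2 < v.2.2)))

lemma kLtb_iff (u v : Nat × Nat × Nat) :
    kLtb u v = true ↔ u.1 < v.1 ∨ (u.1 = v.1 ∧ (u.2.1 < v.2.1 ∨ (u.2.1 = v.2.1 ∧ u.2.2 < v.2.2))) := by
  simp [kLtb]

lemma kLtb_irrefl (u : Nat × Nat × Nat) : kLtb u u = false := by
  rw [← Bool.not_eq_true, kLtb_iff]; omega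

lemma kLtb_asymm {u v : Nat × Nat × Nat} (h1 : kLtb u v = true) (h2 : kLtb v u = true) : False := by
  rw [kLtb_iff] at h1 h2; omega

lemma mem_iff_getD {x : Int} {l : List Int} : x ∈ l ↔ ∃ p < l.length, l.getD p 0 = x := by
  rw [List.mem_iff_getElem]
  constructor
  · rintro ⟨i, h, rfl⟩; exact ⟨i, h, List.getD_eq_getElem l 0 h⟩
  · rintro ⟨p, h, he⟩; exact ⟨p, h, by rw [← List.getD_eq_getElem l 0 h]; exact he⟩

/-- `x` is first reported by A at pair (i,k), position p in data[i]:
    i is x's first containing sublist, k the next one, p x's first position in data[i]. -/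
def CandAt (data : List (List Int)) (i k p : Nat) (x : Int) : Prop :=
  i < k ∧ k < data.length ∧ p < (data.getD i []).length ∧ (data.getD i []).getD p 0 = x ∧
  x ∈ data.getD k [] ∧ (∀ i' < i, x ∉ data.getD i' []) ∧
  (∀ k', i < k' → k' < k → x ∉ data.getD k' []) ∧ (∀ p' < p, (data.getD i []).getD p' 0 ≠ x)

/- ---------- A-side: structural form and events ---------- -/

def rowStep (h : List Int) (t : List (List Int)) (s : List Int) : List Int :=
  t.foldl (fun out B => h.foldl (fun out j => if j ∈ B ∧ j ∉ out then out ++ [j] else out) out) s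

def rows : List (List Int) → List Int → List Int
  | [], s => s
  | h :: t, s => rows t (rowStep h t s)

def posEvs (i k : Nat) (B : List Int) (h : List Int) : List Ev :=
  (List.range h.length).map (fun p => ((i, k, p), (h.getD p 0, B)))

def rowEvs (i : Nat) (h : List Int) : Nat → List (List Int) → List Ev
  | _, [] => []
  | k, B :: t => posEvs i k B h ++ rowEvs i h (k+1) t

def evsFrom : Nat → List (List Int) → List Ev
  | _, [] => []
  | a, h :: t => rowEvs a h (a+1) t ++ evsFrom (a+1) t

def estep (out : List Int) (e : Ev) : List Int :=
  if e.2.1 ∈ e.2.2 ∧ e.2.1 ∉ out then out ++ [e.2.1] else out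

def F (s : List Int) (es : List Ev) : List Int := es.foldl estep s

def hstep (acc : List Ev) (e : Ev) : List Ev :=
  if (decide (e.2.1 ∈ e.2.2) && !(acc.any (fun w => w.2.1 == e.2.1))) = true then acc ++ [e] else acc

def hits (es : List Ev) : List Ev := es.foldl hstep []

/-- first-hit test relative to the full event list E. -/
def fhb (E : List Ev) (e : Ev) : Bool :=
  decide (e.2.1 ∈ e.2.2) &&
  !(E.any (fun w => decide (w.2.1 ∈ w.2.2) && w.2.1 == e.2.1 && kLtb w.1 e.1))

lemma map_range_getD (l : List Int) : (List.range l.length).map (fun p => l.getD p 0) = l := by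
  apply List.ext_getElem
  · simp
  · intro i h1 h2
    simp only [List.getElem_map, List.getElem_range]
    exact List.getD_eq_getElem l 0 h2

lemma A_eq_rows (data : List (List Int)) : find_same_element data = rows data [] := by
  have aux : ∀ (m a : Nat) (s : List Int), a + m = data.length →
      (PySem.List.pyRange (a : Int) ((data.length : Int) - 1) 1).foldl
        (fun out i =>
          (PySem.List.pyRange (i + 1) ((data.length : Int)) 1).foldl
            (fun out k =>
              (PySem.List.pyGetD data i []).foldl
                (fun out j => if j ∈ PySem.List.pyGetD data k [] ∧ j ∉ out then out ++ [j] else out)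
                out) out) s
        = rows (data.drop a) s := by
    intro m
    induction m with
    | zero =>
      intro a s ha
      rw [PySem.List.pyRange_one_eq_nil (by omega)]
      rw [List.drop_eq_nil_of_le (by omega)]
      rfl
    | succ m ih =>
      intro a s ha
      have haln : a < data.length := by omega
      have hdrop : data.drop a = data.getD a [] :: data.drop (a + 1) := by
        rw [List.drop_eq_getElem_cons haln]
        congr 1
        exact (List.getD_eq_getElem data [] haln).symm
      by_cases hm : m = 0
      · subst hm
        rw [PySem.List.pyRange_one_eq_nil (by omega)]
        rw [hdrop, List.drop_eq_nil_of_le (by omega)]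
        simp [rows, rowStep]
      · have hlt : (a : Int) < (data.length : Int) - 1 := by omega
        rw [PySem.List.pyRange_one_cons hlt, List.foldl_cons]
        have hcast : ((a : Int) + 1) = ((a + 1 : Nat) : Int) := by push_cast; ring
        rw [hcast]
        rw [PySem.List.foldl_pyRange_pyGetD' data []
          (f := fun out B =>
            (PySem.List.pyGetD data (a : Int) []).foldl
              (fun out j => if j ∈ B ∧ j ∉ out then out ++ [j] else out) out) s
          (Int.natCast_nonneg _)]
        rw [Int.toNat_natCast]
        rw [PySem.List.pyGetD_natCast]
        rw [ih (a+1) _ (by omega)]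
        rw [hdrop]
        rfl
  have h0 := aux data.length 0 [] (by omega)
  unfold find_same_element
  rw [PySem.List.len_eq]
  simpa using h0

lemma F_posEvs (s : List Int) (i k : Nat) (B h : List Int) :
    F s (posEvs i k B h) =
      h.foldl (fun out j => if j ∈ B ∧ j ∉ out then out ++ [j] else out) s := by
  conv_rhs => rw [← map_range_getD h, List.foldl_map]
  rw [F, posEvs, List.foldl_map]
  rfl

lemma rowStep_eq_F (h : List Int) (t : List (List Int)) (i : Nat) :
    ∀ (k : Nat) (s : List Int), rowStep h t s = F s (rowEvs i h k t) := by
  induction t with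
  | nil => intro k s; rfl
  | cons B t' ih =>
    intro k s
    show (B :: t').foldl _ s = F s (posEvs i k B h ++ rowEvs i h (k+1) t')
    rw [List.foldl_cons, F, List.foldl_append, ← F, ← F, F_posEvs]
    exact ih (k+1) _

lemma rows_eq_F (l : List (List Int)) : ∀ (a : Nat) (s : List Int), rows l s = F s (evsFrom a l) := by
  induction l with
  | nil => intro a s; rfl
  | cons h t ih =>
    intro a s
    show rows t (rowStep h t s) = F s (rowEvs a h (a+1) t ++ evsFrom (a+1) t)
    rw [F, List.foldl_append, ← F, ← F, ← rowStep_eq_F h t a (a+1) s]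
    exact ih (a+1) _

lemma F_hits_aux (es : List Ev) : ∀ (acc : List Ev),
    F (acc.map (fun e => e.2.1)) es = (es.foldl hstep acc).map (fun e => e.2.1) := by
  induction es with
  | nil => intro acc; rfl
  | cons e es' ih =>
    intro acc
    rw [F, List.foldl_cons, List.foldl_cons, ← F]
    have hcond : estep (acc.map (fun e => e.2.1)) e = (hstep acc e).map (fun e => e.2.1) := by
      by_cases h1 : e.2.1 ∈ e.2.2
      · by_cases h2 : e.2.1 ∈ acc.map (fun e => e.2.1)
        · have hany : (acc.any (fun w => w.2.1 == e.2.1)) = true := by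
            rw [List.any_eq_true]
            obtain ⟨w, hw, hv⟩ := List.mem_map.mp h2
            exact ⟨w, hw, by simp [hv]⟩
          simp [estep, hstep, h1, h2, hany]
        · have hany : (acc.any (fun w => w.2.1 == e.2.1)) = false := by
            rw [← Bool.not_eq_true, List.any_eq_true]
            rintro ⟨w, hw, hv⟩
            exact h2 (List.mem_map.mpr ⟨w, hw, by simpa using hv⟩)
          simp [estep, hstep, h1, h2, hany]
      · simp [estep, hstep, h1]
    rw [hcond]
    exact ih (hstep acc e)

lemma F_eq_hits (es : List Ev) : F [] es = (hits es).map (fun e => e.2.1) := by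
  simpa using F_hits_aux es []

lemma mem_posEvs {i k : Nat} {B h : List Int} {e : Ev} :
    e ∈ posEvs i k B h ↔ ∃ p, p < h.length ∧ e = ((i, k, p), (h.getD p 0, B)) := by
  unfold posEvs
  rw [List.mem_map]
  constructor
  · rintro ⟨p, hp, rfl⟩; exact ⟨p, List.mem_range.mp hp, rfl⟩
  · rintro ⟨p, hp, rfl⟩; exact ⟨p, List.mem_range.mpr hp, rfl⟩

lemma mem_rowEvs {i : Nat} {h : List Int} :
    ∀ {k0 : Nat} {t : List (List Int)} {e : Ev},
      e ∈ rowEvs i h k0 t ↔ ∃ kN, kN < t.length ∧ ∃ p, p < h.length ∧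
        e = ((i, k0 + kN, p), (h.getD p 0, t.getD kN [])) := by
  intro k0 t
  induction t generalizing k0 with
  | nil => intro e; simp [rowEvs]
  | cons B t' ih =>
    intro e
    show e ∈ posEvs i k0 B h ++ rowEvs i h (k0+1) t' ↔ _
    rw [List.mem_append, mem_posEvs, ih]
    constructor
    · rintro (⟨p, hp, rfl⟩ | ⟨kN, hk, p, hp, rfl⟩)
      · exact ⟨0, by simp, p, hp, by simp⟩
      · refine ⟨kN + 1, by simpa using hk, p, hp, ?_⟩
        have harith : k0 + (kN + 1) = k0 + 1 + kN := by omega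
        rw [harith, List.getD_cons_succ]
    · rintro ⟨kN, hk, p, hp, rfl⟩
      match kN with
      | 0 => exact Or.inl ⟨p, hp, by simp⟩
      | kN + 1 =>
        refine Or.inr ⟨kN, by simpa using hk, p, hp, ?_⟩
        have harith : k0 + (kN + 1) = k0 + 1 + kN := by omega
        rw [harith, List.getD_cons_succ]

lemma mem_evsFrom : ∀ {a : Nat} {l : List (List Int)} {e : Ev},
    e ∈ evsFrom a l ↔ ∃ iN kN pN : Nat, iN < kN ∧ kN < l.length ∧ pN < (l.getD iN []).length ∧
      e = ((a + iN, a + kN, pN), ((l.getD iN []).getD pN 0, l.getD kN [])) := by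
  intro a l
  induction l generalizing a with
  | nil => intro e; simp [evsFrom]
  | cons h t ih =>
    intro e
    show e ∈ rowEvs a h (a+1) t ++ evsFrom (a+1) t ↔ _
    rw [List.mem_append, mem_rowEvs, ih]
    constructor
    · rintro (⟨kN, hk, p, hp, rfl⟩ | ⟨iN, kN, pN, h1, h2, h3, rfl⟩)
      · refine ⟨0, kN + 1, p, by omega, by simpa using hk, by simpa using hp, ?_⟩
        have e1 : a + 1 + kN = a + (kN + 1) := by omega
        rw [e1]
        simp
      · refine ⟨iN + 1, kN + 1, pN, by omega, by simpa using h2, by simpa using h3, ?_⟩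
        have e1 : a + 1 + iN = a + (iN + 1) := by omega
        have e2 : a + 1 + kN = a + (kN + 1) := by omega
        rw [e1, e2]
        simp
    · rintro ⟨iN, kN, pN, h1, h2, h3, rfl⟩
      match iN, kN with
      | 0, kN + 1 =>
        refine Or.inl ⟨kN, by simpa using h2, pN, by simpa using h3, ?_⟩
        have e1 : a + (kN + 1) = a + 1 + kN := by omega
        rw [e1]
        simp
      | iN + 1, kN + 1 =>
        refine Or.inr ⟨iN, kN, pN, by omega, by simpa using h2, by simpa using h3, ?_⟩
        have e1 : a + (iN + 1) = a + 1 + iN := by omega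
        have e2 : a + (kN + 1) = a + 1 + kN := by omega
        rw [e1, e2]
        simp

lemma mem_evsFrom_zero {l : List (List Int)} {e : Ev} :
    e ∈ evsFrom 0 l ↔ ∃ iN kN pN : Nat, iN < kN ∧ kN < l.length ∧ pN < (l.getD iN []).length ∧
      e = ((iN, kN, pN), ((l.getD iN []).getD pN 0, l.getD kN [])) := by
  rw [mem_evsFrom]
  constructor
  · rintro ⟨iN, kN, pN, h1, h2, h3, rfl⟩
    exact ⟨iN, kN, pN, h1, h2, h3, by simp⟩
  · rintro ⟨iN, kN, pN, h1, h2, h3, rfl⟩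
    exact ⟨iN, kN, pN, h1, h2, h3, by simp⟩

lemma pw_posEvs (i k : Nat) (B h : List Int) :
    (posEvs i k B h).Pairwise (fun e e' => kLtb e.1 e'.1 = true) := by
  unfold posEvs
  rw [List.pairwise_map]
  refine List.Pairwise.imp ?_ List.pairwise_lt_range
  intro p q hpq
  rw [kLtb_iff]
  exact Or.inr ⟨rfl, Or.inr ⟨rfl, hpq⟩⟩

lemma pw_rowEvs (i : Nat) (h : List Int) :
    ∀ (k0 : Nat) (t : List (List Int)),
      (rowEvs i h k0 t).Pairwise (fun e e' => kLtb e.1 e'.1 = true) := by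
  intro k0 t
  induction t generalizing k0 with
  | nil => simp [rowEvs]
  | cons B t' ih =>
    show (posEvs i k0 B h ++ rowEvs i h (k0+1) t').Pairwise _
    rw [List.pairwise_append]
    refine ⟨pw_posEvs i k0 B h, ih (k0+1), ?_⟩
    intro e he e' he'
    obtain ⟨p, hp, rfl⟩ := mem_posEvs.mp he
    obtain ⟨kN, hkN, p', hp', rfl⟩ := mem_rowEvs.mp he'
    rw [kLtb_iff]
    exact Or.inr ⟨rfl, Or.inl (show k0 < k0 + 1 + kN by omega)⟩

lemma pw_evsFrom : ∀ (a : Nat) (l : List (List Int)),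
    (evsFrom a l).Pairwise (fun e e' => kLtb e.1 e'.1 = true) := by
  intro a l
  induction l generalizing a with
  | nil => simp [evsFrom]
  | cons h t ih =>
    show (rowEvs a h (a+1) t ++ evsFrom (a+1) t).Pairwise _
    rw [List.pairwise_append]
    refine ⟨pw_rowEvs a h (a+1) t, ih (a+1), ?_⟩
    intro e he e' he'
    obtain ⟨kN, hkN, p, hp, rfl⟩ := mem_rowEvs.mp he
    obtain ⟨iN, kN', pN, h1, h2, h3, rfl⟩ := mem_evsFrom.mp he'
    rw [kLtb_iff]
    exact Or.inl (show a < a + 1 + iN by omega)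

lemma first_qual (E : List Ev) (hpw : E.Pairwise (fun e e' => kLtb e.1 e'.1 = true)) (v : Int) :
    ∀ (P pre rest : List Ev), E = pre ++ (P ++ rest) →
      (∀ w ∈ pre, ¬ (w.2.1 ∈ w.2.2 ∧ w.2.1 = v)) →
      (∃ w ∈ P, w.2.1 ∈ w.2.2 ∧ w.2.1 = v) →
      ∃ u ∈ P, fhb E u = true ∧ u.2.1 = v := by
  intro P
  induction P with
  | nil =>
    rintro pre rest h hpre ⟨w, hw, _⟩
    exact absurd hw (List.not_mem_nil)
  | cons w0 P1 ih =>
    intro pre rest hE hpre hex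
    by_cases hq : w0.2.1 ∈ w0.2.2 ∧ w0.2.1 = v
    · refine ⟨w0, List.mem_cons_self, ?_, hq.2⟩
      have hnone : ∀ w ∈ E, ¬ (w.2.1 ∈ w.2.2 ∧ w.2.1 = w0.2.1 ∧ kLtb w.1 w0.1 = true) := by
        intro w hwE hcontra
        rw [hE] at hwE
        rcases List.mem_append.mp hwE with h1 | h2
        · exact hpre w h1 ⟨hcontra.1, hcontra.2.1.trans hq.2⟩
        · rcases List.mem_cons.mp h2 with h3 | h4
          · subst h3; rw [kLtb_irrefl] at hcontra; exact Bool.false_ne_true hcontra.2.2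
          · have hpw' := hpw
            rw [hE, List.pairwise_append] at hpw'
            have hc := List.pairwise_cons.mp hpw'.2.1
            exact kLtb_asymm (hc.1 w h4) hcontra.2.2
      have hany : E.any (fun w => decide (w.2.1 ∈ w.2.2) && w.2.1 == w0.2.1 && kLtb w.1 w0.1) = false := by
        rw [← Bool.not_eq_true, List.any_eq_true]
        rintro ⟨w, hwE, hw⟩
        simp only [Bool.and_eq_true, decide_eq_true_eq, beq_iff_eq] at hw
        exact hnone w hwE ⟨hw.1.1, hw.1.2, hw.2⟩
      simp [fhb, hq.1, hany]
    · obtain ⟨w, hw, hcond⟩ := hex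
      have hw' : w ∈ P1 := by
        rcases List.mem_cons.mp hw with h | h
        · exact absurd (h ▸ hcond) hq
        · exact h
      have hE' : E = (pre ++ [w0]) ++ (P1 ++ rest) := by
        rw [hE]; simp
      have hpre' : ∀ w ∈ pre ++ [w0], ¬ (w.2.1 ∈ w.2.2 ∧ w.2.1 = v) := by
        intro u hu
        rcases List.mem_append.mp hu with h | h
        · exact hpre u h
        · rw [List.mem_singleton.mp h]; exact hq
      obtain ⟨u, hu, hfh, hv⟩ := ih (pre ++ [w0]) rest hE' hpre' ⟨w, hw', hcond⟩
      exact ⟨u, List.mem_cons_of_mem _ hu, hfh, hv⟩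

lemma hits_eq_filter (E : List Ev) (hpw : E.Pairwise (fun e e' => kLtb e.1 e'.1 = true)) :
    hits E = E.filter (fhb E) := by
  suffices h : ∀ P S, E = P ++ S → P.foldl hstep [] = P.filter (fhb E) by
    exact h E [] (by simp)
  intro P
  induction P using List.reverseRecOn with
  | nil => intro S h; rfl
  | append_singleton P0 e ih =>
    intro S hE
    have hsplit : E = P0 ++ e :: S := by rw [hE, List.append_assoc]; rfl
    rw [List.foldl_append, List.foldl_cons, List.foldl_nil]
    rw [ih (e :: S) hsplit]
    rw [List.filter_append]
    by_cases hc : e.2.1 ∈ e.2.2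
    · by_cases hearlier : ∃ w ∈ E, w.2.1 ∈ w.2.2 ∧ w.2.1 = e.2.1 ∧ kLtb w.1 e.1 = true
      · have hfhb : fhb E e = false := by
          obtain ⟨w, hwE, h1, h2, h3⟩ := hearlier
          have hany : E.any (fun w => decide (w.2.1 ∈ w.2.2) && w.2.1 == e.2.1 && kLtb w.1 e.1) = true :=
            List.any_eq_true.mpr ⟨w, hwE, by
              simp only [Bool.and_eq_true, decide_eq_true_eq, beq_iff_eq]
              exact ⟨⟨h1, h2⟩, h3⟩⟩
          simp [fhb, hany]
        have hwP : ∃ w ∈ P0, w.2.1 ∈ w.2.2 ∧ w.2.1 = e.2.1 := by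
          obtain ⟨w, hwE, h1, h2, h3⟩ := hearlier
          have hmem : w ∈ P0 ∨ w = e ∨ w ∈ S := by
            rw [hsplit] at hwE
            rcases List.mem_append.mp hwE with h | h
            · exact Or.inl h
            · rcases List.mem_cons.mp h with h' | h'
              · exact Or.inr (Or.inl h')
              · exact Or.inr (Or.inr h')
          rcases hmem with h | h | h
          · exact ⟨w, h, h1, h2⟩
          · subst h; rw [kLtb_irrefl] at h3; exact absurd h3 Bool.false_ne_true
          · exfalso
            have hpw' := hpw
            rw [hsplit, List.pairwise_append] at hpw'
            have hc' := List.pairwise_cons.mp hpw'.2.1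
            exact kLtb_asymm h3 (hc'.1 w h)
        obtain ⟨u, huP, hufh, huv⟩ :=
          first_qual E hpw e.2.1 P0 [] (e :: S) (by simpa using hsplit) (by simp) hwP
        have hanyf : (List.filter (fhb E) P0).any (fun w => w.2.1 == e.2.1) = true :=
          List.any_eq_true.mpr ⟨u, List.mem_filter.mpr ⟨huP, hufh⟩, by simp [huv]⟩
        simp [hstep, hfhb, hanyf, List.filter_nil]
      · have hanyE : E.any (fun w => decide (w.2.1 ∈ w.2.2) && w.2.1 == e.2.1 && kLtb w.1 e.1) = false := by
          rw [← Bool.not_eq_true, List.any_eq_true]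
          rintro ⟨w, hwE, hw⟩
          simp only [Bool.and_eq_true, decide_eq_true_eq, beq_iff_eq] at hw
          exact hearlier ⟨w, hwE, hw.1.1, hw.1.2, hw.2⟩
        have hfhb : fhb E e = true := by simp [fhb, hc, hanyE]
        have hanyf : (List.filter (fhb E) P0).any (fun w => w.2.1 == e.2.1) = false := by
          rw [← Bool.not_eq_true, List.any_eq_true]
          rintro ⟨u, hu, huv⟩
          have hu' := List.mem_filter.mp hu
          have hcond : u.2.1 ∈ u.2.2 := by
            have := hu'.2
            simp only [fhb, Bool.and_eq_true, decide_eq_true_eq] at this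
            exact this.1
          have hklt : kLtb u.1 e.1 = true := by
            have hpw' := hpw
            rw [hsplit, List.pairwise_append] at hpw'
            exact hpw'.2.2 u hu'.1 e (List.mem_cons_self)
          exact hearlier ⟨u, hsplit ▸ List.mem_append.mpr (Or.inl hu'.1), hcond, by simpa using huv, hklt⟩
        simp [hstep, hc, hfhb, hanyf, List.filter_nil]
    · have hfhb : fhb E e = false := by simp [fhb, hc]
      simp [hstep, hc, hfhb, List.filter_nil]

lemma mem_filter_fhb {data : List (List Int)} {e : Ev} :
    e ∈ (evsFrom 0 data).filter (fhb (evsFrom 0 data)) ↔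
      ∃ i k p x, CandAt data i k p x ∧ e = ((i, k, p), (x, data.getD k [])) := by
  rw [List.mem_filter]
  constructor
  · rintro ⟨hmem, hfh⟩
    obtain ⟨i, k, p, hik, hkn, hpn, rfl⟩ := mem_evsFrom_zero.mp hmem
    refine ⟨i, k, p, (data.getD i []).getD p 0, ?_, rfl⟩
    have hfh' := hfh
    simp only [fhb, Bool.and_eq_true, decide_eq_true_eq, Bool.not_eq_true'] at hfh'
    have hcond : (data.getD i []).getD p 0 ∈ data.getD k [] := hfh'.1
    have hnoany : ∀ w ∈ evsFrom 0 data,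
        ¬ (w.2.1 ∈ w.2.2 ∧ w.2.1 = (data.getD i []).getD p 0 ∧ kLtb w.1 (i, k, p) = true) := by
      intro w hwE hcontra
      have : (evsFrom 0 data).any
          (fun w => decide (w.2.1 ∈ w.2.2) && w.2.1 == (data.getD i []).getD p 0 && kLtb w.1 (i, k, p)) = true :=
        List.any_eq_true.mpr ⟨w, hwE, by
          simp only [Bool.and_eq_true, decide_eq_true_eq, beq_iff_eq]
          exact ⟨⟨hcontra.1, hcontra.2.1⟩, hcontra.2.2⟩⟩
      rw [hfh'.2] at this
      exact Bool.false_ne_true this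
    refine ⟨hik, hkn, hpn, rfl, hcond, ?_, ?_, ?_⟩
    · intro i' hi' hmem'
      obtain ⟨p', hp', hgp'⟩ := mem_iff_getD.mp hmem'
      apply hnoany ((i', i, p'), ((data.getD i' []).getD p' 0, data.getD i []))
        (mem_evsFrom_zero.mpr ⟨i', i, p', hi', by omega, hp', rfl⟩)
      refine ⟨?_, ?_, ?_⟩
      · show (data.getD i' []).getD p' 0 ∈ data.getD i []
        rw [hgp']
        exact mem_iff_getD.mpr ⟨p, hpn, rfl⟩
      · exact hgp'
      · show kLtb (i', i, p') (i, k, p) = true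
        rw [kLtb_iff]
        exact Or.inl hi'
    · intro k' h1 h2 hmem'
      apply hnoany ((i, k', p), ((data.getD i []).getD p 0, data.getD k' []))
        (mem_evsFrom_zero.mpr ⟨i, k', p, h1, by omega, hpn, rfl⟩)
      refine ⟨hmem', rfl, ?_⟩
      show kLtb (i, k', p) (i, k, p) = true
      rw [kLtb_iff]
      exact Or.inr ⟨rfl, Or.inl h2⟩
    · intro p' hp' heq
      apply hnoany ((i, k, p'), ((data.getD i []).getD p' 0, data.getD k []))
        (mem_evsFrom_zero.mpr ⟨i, k, p', hik, hkn, by omega, rfl⟩)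
      refine ⟨?_, heq, ?_⟩
      · show (data.getD i []).getD p' 0 ∈ data.getD k []
        rw [heq]
        exact hcond
      · show kLtb (i, k, p') (i, k, p) = true
        rw [kLtb_iff]
        exact Or.inr ⟨rfl, Or.inr ⟨rfl, hp'⟩⟩
  · rintro ⟨i, k, p, x, hcand, rfl⟩
    obtain ⟨hik, hkn, hpn, hgd, hxk, hA, hB, hC⟩ := hcand
    have hmem : ((i, k, p), (x, data.getD k [])) ∈ evsFrom 0 data := by
      refine mem_evsFrom_zero.mpr ⟨i, k, p, hik, hkn, hpn, ?_⟩
      rw [hgd]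
    refine ⟨hmem, ?_⟩
    have hall : ∀ w ∈ evsFrom 0 data,
        ¬ (w.2.1 ∈ w.2.2 ∧ w.2.1 = x ∧ kLtb w.1 (i, k, p) = true) := by
      intro w hwE hcontra
      obtain ⟨i', k', p', h1, h2, h3, rfl⟩ := mem_evsFrom_zero.mp hwE
      have hcond' : (data.getD i' []).getD p' 0 ∈ data.getD k' [] := hcontra.1
      have hval' : (data.getD i' []).getD p' 0 = x := hcontra.2.1
      have hklt' : i' < i ∨ (i' = i ∧ (k' < k ∨ (k' = k ∧ p' < p))) := by
        have := hcontra.2.2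
        rw [kLtb_iff] at this
        exact this
      rcases hklt' with h | ⟨rfl, h | ⟨rfl, h⟩⟩
      · exact hA i' h (mem_iff_getD.mpr ⟨p', h3, hval'⟩)
      · exact hB k' h1 h (hval' ▸ hcond')
      · exact hC p' h hval'
    have hany : (evsFrom 0 data).any
        (fun w => decide (w.2.1 ∈ w.2.2) && w.2.1 == x && kLtb w.1 (i, k, p)) = false := by
      rw [← Bool.not_eq_true, List.any_eq_true]
      rintro ⟨w, hwE, hw⟩
      simp only [Bool.and_eq_true, decide_eq_true_eq, beq_iff_eq] at hw
      exact hall w hwE ⟨hw.1.1, hw.1.2, hw.2⟩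
    show (decide (x ∈ data.getD k []) &&
      !((evsFrom 0 data).any
        (fun w => decide (w.2.1 ∈ w.2.2) && w.2.1 == x && kLtb w.1 (i, k, p)))) = true
    rw [hany]
    simp only [Bool.not_false, Bool.and_true, decide_eq_true_eq]
    exact hxk

/- ---------- B-side: dict invariant ---------- -/

/-- first position of x in h. -/
def pos1 (x : Int) : List Int → Nat
  | [] => 0
  | y :: t => if y = x then 0 else pos1 x t + 1

/-- first index ≥ a (within l, offset a) of a sublist containing x. -/
def findC (a : Nat) (l : List (List Int)) (x : Int) : Option Nat :=
  match l with
  | [] => none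
  | h :: t => if x ∈ h then some a else findC (a+1) t x

/-- dict value spec: first containing sublist, position there, second containing sublist. -/
def dSpecFrom (a : Nat) (l : List (List Int)) (x : Int) : Option (Nat × Nat × Option Nat) :=
  match l with
  | [] => none
  | h :: t => if x ∈ h then some (a, pos1 x h, findC (a+1) t x) else dSpecFrom (a+1) t x

def castv : Nat × Nat × Option Nat → Int × Int × Option Int
  | (s1, p1, s2o) => ((s1 : Int), (p1 : Int), s2o.map (fun m => (m : Int)))

def dstep (info : PySem.Dict Int (Int × Int × Option Int)) (i q x : Int) :
    PySem.Dict Int (Int × Int × Option Int) :=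
  match info.get? x with
  | none => info.insert x (i, q, none)
  | some r => if r.2.2 = none ∧ i ≠ r.1 then info.insert x (r.1, r.2.1, some i) else info

def Binfo (data : List (List Int)) : PySem.Dict Int (Int × Int × Option Int) :=
  (PySem.List.enumerate data 0).foldl (fun info p =>
    (PySem.List.enumerate p.2 0).foldl (fun info q =>
      match info.get? q.2 with
      | none => info.insert q.2 (p.1, q.1, none)
      | some r => if r.2.2 = none ∧ p.1 ≠ r.1 then info.insert q.2 (r.1, r.2.1, some p.1) else info)
      info) PySem.Dict.empty

def Bcands (data : List (List Int)) : List (Int × Int × Int × Int) :=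
  (Binfo data).items.filterMap (fun r =>
    match r with
    | (x, (s1, p1, some s2)) => some (s1, s2, p1, x)
    | _ => none)

def bkey (t : Int × Int × Int × Int) : Lex (Int × Lex (Int × Int)) :=
  toLex (t.1, toLex (t.2.1, t.2.2.1))

lemma altB_unfold (data : List (List Int)) :
    find_same_element_alt data = (PySem.List.sorted (Bcands data) bkey false).map (fun t => t.2.2.2) := rfl

lemma dstep_none {d : PySem.Dict Int (Int × Int × Option Int)} {x i q : Int}
    (h : d.get? x = none) : dstep d i q x = d.insert x (i, q, none) := by
  unfold dstep; rw [h]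

lemma dstep_some {d : PySem.Dict Int (Int × Int × Option Int)} {x i q s1v p1v : Int}
    {s2v : Option Int} (h : d.get? x = some (s1v, p1v, s2v)) :
    dstep d i q x = if s2v = none ∧ i ≠ s1v then d.insert x (s1v, p1v, some i) else d := by
  unfold dstep; rw [h]

lemma pos1_spec {x : Int} {h : List Int} (hx : x ∈ h) :
    pos1 x h < h.length ∧ h.getD (pos1 x h) 0 = x ∧ ∀ p' < pos1 x h, h.getD p' 0 ≠ x := by
  induction h with
  | nil => cases hx
  | cons y t ih =>
    by_cases hy : y = x
    · refine ⟨by simp [pos1, hy], by simp [pos1, hy], ?_⟩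
      intro p' hp'
      simp [pos1, hy] at hp'
    · have hx' : x ∈ t := by
        rcases List.mem_cons.mp hx with h | h
        · exact absurd h.symm hy
        · exact h
      obtain ⟨h1, h2, h3⟩ := ih hx'
      refine ⟨?_, ?_, ?_⟩
      · simp only [pos1, if_neg hy, List.length_cons]; omega
      · simp only [pos1, if_neg hy]
        rw [List.getD_cons_succ]
        exact h2
      · intro p' hp'
        simp only [pos1, if_neg hy] at hp'
        match p' with
        | 0 =>
          rw [List.getD_cons_zero]
          exact hy
        | p' + 1 =>
          rw [List.getD_cons_succ]
          exact h3 p' (by omega)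

lemma pos1_eq {x : Int} {h : List Int} {p : Nat} (hp : p < h.length) (hg : h.getD p 0 = x)
    (hmin : ∀ p' < p, h.getD p' 0 ≠ x) : pos1 x h = p := by
  have hx : x ∈ h := mem_iff_getD.mpr ⟨p, hp, hg⟩
  obtain ⟨h1, h2, h3⟩ := pos1_spec hx
  rcases Nat.lt_trichotomy (pos1 x h) p with h | h | h
  · exact absurd h2 (hmin _ h)
  · exact h
  · exact absurd hg (h3 p h)

lemma pos1_append_left {x : Int} {h1 : List Int} (l : List Int) (hx : x ∈ h1) :
    pos1 x (h1 ++ l) = pos1 x h1 := by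
  induction h1 with
  | nil => cases hx
  | cons y t ih =>
    by_cases hy : y = x
    · simp [pos1, hy, List.cons_append]
    · have hx' : x ∈ t := by
        rcases List.mem_cons.mp hx with h | h
        · exact absurd h.symm hy
        · exact h
      simp [pos1, hy, List.cons_append, ih hx']

lemma pos1_append_self {x : Int} {h1 : List Int} (hx : x ∉ h1) :
    pos1 x (h1 ++ [x]) = h1.length := by
  induction h1 with
  | nil => simp [pos1]
  | cons y t ih =>
    have hy : y ≠ x := fun h => hx (h ▸ List.mem_cons_self)
    have hx' : x ∉ t := fun h => hx (List.mem_cons_of_mem _ h)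
    simp [pos1, hy, List.cons_append, ih hx']

lemma findC_append_none {a : Nat} {t : List (List Int)} {x : Int} (g : List Int)
    (h : findC a t x = none) :
    findC a (t ++ [g]) x = if x ∈ g then some (a + t.length) else none := by
  induction t generalizing a with
  | nil => simp [findC]
  | cons h0 t' ih =>
    simp only [List.cons_append, findC] at h ⊢
    by_cases hx : x ∈ h0
    · rw [if_pos hx] at h; cases h
    · rw [if_neg hx] at h ⊢
      rw [ih h]
      simp only [List.length_cons]
      have harith : a + 1 + t'.length = a + (t'.length + 1) := by omega
      rw [harith]

lemma findC_append_some {a : Nat} {t : List (List Int)} {x : Int} {r : Nat} (g : List Int)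
    (h : findC a t x = some r) : findC a (t ++ [g]) x = some r := by
  induction t generalizing a with
  | nil => cases h
  | cons h0 t' ih =>
    simp only [List.cons_append, findC] at h ⊢
    by_cases hx : x ∈ h0
    · rw [if_pos hx] at h ⊢; exact h
    · rw [if_neg hx] at h ⊢; exact ih h

lemma findC_some_iff {a : Nat} {l : List (List Int)} {x : Int} {r : Nat} :
    findC a l x = some r ↔ ∃ kN, kN < l.length ∧ x ∈ l.getD kN [] ∧
      (∀ j < kN, x ∉ l.getD j []) ∧ r = a + kN := by
  induction l generalizing a with
  | nil => simp [findC]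
  | cons h t ih =>
    simp only [findC]
    by_cases hx : x ∈ h
    · rw [if_pos hx]
      constructor
      · intro he
        injection he with he
        exact ⟨0, by simp, by simpa using hx, by omega, by omega⟩
      · rintro ⟨kN, h1, h2, h3, rfl⟩
        match kN with
        | 0 => simp
        | kN + 1 => exact absurd (by simpa using hx) (h3 0 (by omega))
    · rw [if_neg hx, ih]
      constructor
      · rintro ⟨kN, h1, h2, h3, rfl⟩
        refine ⟨kN + 1, by simpa using h1, by simpa [List.getD_cons_succ] using h2, ?_, by omega⟩
        intro j hj
        match j with
        | 0 => simpa using hx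
        | j + 1 =>
          rw [List.getD_cons_succ]
          exact h3 j (by omega)
      · rintro ⟨kN, h1, h2, h3, rfl⟩
        match kN with
        | 0 => exact absurd (by simpa using h2) hx
        | kN + 1 =>
          refine ⟨kN, by simpa using h1, by simpa [List.getD_cons_succ] using h2, ?_, by omega⟩
          intro j hj
          have := h3 (j + 1) (by omega)
          rwa [List.getD_cons_succ] at this

lemma dSpec_append_none {a : Nat} {P : List (List Int)} {x : Int} (g : List Int)
    (h : dSpecFrom a P x = none) :
    dSpecFrom a (P ++ [g]) x = if x ∈ g then some (a + P.length, pos1 x g, none) else none := by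
  induction P generalizing a with
  | nil => simp [dSpecFrom, findC]
  | cons h0 P' ih =>
    simp only [List.cons_append, dSpecFrom] at h ⊢
    by_cases hx : x ∈ h0
    · rw [if_pos hx] at h; cases h
    · rw [if_neg hx] at h ⊢
      rw [ih h]
      simp only [List.length_cons]
      have harith : a + 1 + P'.length = a + (P'.length + 1) := by omega
      rw [harith]

lemma dSpec_append_some_none {a : Nat} {P : List (List Int)} {x : Int} {s1 p1 : Nat} (g : List Int)
    (h : dSpecFrom a P x = some (s1, p1, none)) :
    dSpecFrom a (P ++ [g]) x =
      some (s1, p1, if x ∈ g then some (a + P.length) else none) := by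
  induction P generalizing a with
  | nil => cases h
  | cons h0 P' ih =>
    simp only [List.cons_append, dSpecFrom] at h ⊢
    by_cases hx : x ∈ h0
    · rw [if_pos hx] at h ⊢
      simp only [Option.some.injEq, Prod.mk.injEq] at h
      obtain ⟨rfl, rfl, h3⟩ := h
      rw [findC_append_none g h3]
      simp only [List.length_cons]
      have harith : a + 1 + P'.length = a + (P'.length + 1) := by omega
      rw [harith]
    · rw [if_neg hx] at h ⊢
      rw [ih h]
      simp only [List.length_cons]
      have harith : a + 1 + P'.length = a + (P'.length + 1) := by omega
      rw [harith]

lemma dSpec_append_some_some {a : Nat} {P : List (List Int)} {x : Int} {s1 p1 s2 : Nat} (g : List Int)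
    (h : dSpecFrom a P x = some (s1, p1, some s2)) :
    dSpecFrom a (P ++ [g]) x = some (s1, p1, some s2) := by
  induction P generalizing a with
  | nil => cases h
  | cons h0 P' ih =>
    simp only [List.cons_append, dSpecFrom] at h ⊢
    by_cases hx : x ∈ h0
    · rw [if_pos hx] at h ⊢
      simp only [Option.some.injEq, Prod.mk.injEq] at h
      obtain ⟨rfl, rfl, h3⟩ := h
      rw [findC_append_some g h3]
    · rw [if_neg hx] at h ⊢
      exact ih h

lemma dSpec_bounds {a : Nat} {P : List (List Int)} {x : Int} {r : Nat × Nat × Option Nat}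
    (h : dSpecFrom a P x = some r) : a ≤ r.1 ∧ r.1 < a + P.length := by
  induction P generalizing a with
  | nil => cases h
  | cons h0 P' ih =>
    simp only [dSpecFrom] at h
    by_cases hx : x ∈ h0
    · rw [if_pos hx] at h
      injection h with h
      rw [← h]
      exact ⟨Nat.le_refl a, by simp only [List.length_cons]; omega⟩
    · rw [if_neg hx] at h
      obtain ⟨hl, hr⟩ := ih h
      exact ⟨by omega, by simp only [List.length_cons]; omega⟩

lemma dSpec_snoc_ne {P : List (List Int)} {h1 : List Int} {x y : Int} (hxy : x ≠ y) :
    dSpecFrom 0 (P ++ [h1 ++ [y]]) x = dSpecFrom 0 (P ++ [h1]) x := by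
  have hmem : x ∈ h1 ++ [y] ↔ x ∈ h1 := by simp [hxy]
  cases hd : dSpecFrom 0 P x with
  | none =>
    rw [dSpec_append_none _ hd, dSpec_append_none _ hd]
    by_cases hx : x ∈ h1
    · rw [if_pos (hmem.mpr hx), if_pos hx, pos1_append_left [y] hx]
    · rw [if_neg (fun h => hx (hmem.mp h)), if_neg hx]
  | some r =>
    obtain ⟨s1, p1, s2o⟩ := r
    cases s2o with
    | none =>
      rw [dSpec_append_some_none _ hd, dSpec_append_some_none _ hd]
      by_cases hx : x ∈ h1
      · rw [if_pos (hmem.mpr hx), if_pos hx]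
      · rw [if_neg (fun h => hx (hmem.mp h)), if_neg hx]
    | some s2 =>
      rw [dSpec_append_some_some _ hd, dSpec_append_some_some _ hd]

lemma dSpec_snoc_nil {P : List (List Int)} {x : Int} :
    dSpecFrom 0 (P ++ [([] : List Int)]) x = dSpecFrom 0 P x := by
  cases hd : dSpecFrom 0 P x with
  | none => rw [dSpec_append_none _ hd]; simp
  | some r =>
    obtain ⟨s1, p1, s2o⟩ := r
    cases s2o with
    | none => rw [dSpec_append_some_none _ hd]; simp
    | some s2 => rw [dSpec_append_some_some _ hd]

def Good (P : List (List Int)) (d : PySem.Dict Int (Int × Int × Option Int)) : Prop :=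
  (∀ x, d.get? x = (dSpecFrom 0 P x).map castv) ∧ d.keys.Nodup

lemma good_step (P : List (List Int)) (h1 : List Int) (y : Int)
    (d : PySem.Dict Int (Int × Int × Option Int)) (hg : Good (P ++ [h1]) d) :
    Good (P ++ [h1 ++ [y]]) (dstep d (P.length : Int) (h1.length : Int) y) := by
  obtain ⟨hget, hnd⟩ := hg
  have hy := hget y
  cases hd1 : dSpecFrom 0 (P ++ [h1]) y with
  | none =>
    have hyn : d.get? y = none := by rw [hy, hd1]; rfl
    rw [dstep_none hyn]
    have hdP : dSpecFrom 0 P y = none := by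
      cases hdP : dSpecFrom 0 P y with
      | none => rfl
      | some r =>
        obtain ⟨s1, p1, s2o⟩ := r
        cases s2o with
        | none => rw [dSpec_append_some_none _ hdP] at hd1; cases hd1
        | some s2 => rw [dSpec_append_some_some _ hdP] at hd1; cases hd1
    have hyh1 : y ∉ h1 := by
      intro hmem
      rw [dSpec_append_none _ hdP, if_pos hmem] at hd1
      cases hd1
    constructor
    · intro x
      by_cases hxy : x = y
      · rw [hxy, PySem.Dict.get?_insert_self]
        rw [dSpec_append_none _ hdP, if_pos (by simp), pos1_append_self hyh1]
        simp [castv]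
      · rw [PySem.Dict.get?_insert_of_ne _ _ hxy, hget x, dSpec_snoc_ne hxy]
    · exact PySem.Dict.nodup_keys_insert _ _ _ hnd
  | some r =>
    obtain ⟨s1, p1, s2o⟩ := r
    cases s2o with
    | none =>
      have hys : d.get? y = some ((s1 : Int), (p1 : Int), none) := by rw [hy, hd1]; rfl
      rw [dstep_some hys]
      cases hdP : dSpecFrom 0 P y with
      | none =>
        -- y first appears inside h1 itself: s1 = P.length, no update
        have hyh1 : y ∈ h1 := by
          by_contra hmem
          rw [dSpec_append_none _ hdP, if_neg hmem] at hd1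
          cases hd1
        have hd1' := hd1
        rw [dSpec_append_none _ hdP, if_pos hyh1] at hd1'
        simp only [Option.some.injEq, Prod.mk.injEq] at hd1'
        have hs1 : s1 = P.length := by omega
        have hp1 : p1 = pos1 y h1 := hd1'.2.1.symm
        rw [if_neg (by
          rintro ⟨-, hne⟩
          exact hne (by rw [hs1]))]
        constructor
        · intro x
          by_cases hxy : x = y
          · rw [hxy, hy, hd1, dSpec_append_none (h1 ++ [y]) hdP, if_pos (by simp [hyh1]),
              pos1_append_left [y] hyh1]
            simp [castv, hs1, hp1]
          · rw [hget x, dSpec_snoc_ne hxy]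
        · exact hnd
      | some r' =>
        obtain ⟨s1', p1', s2o'⟩ := r'
        cases s2o' with
        | some s2'' =>
          rw [dSpec_append_some_some _ hdP] at hd1
          simp at hd1
        | none =>
          have hd1' := hd1
          rw [dSpec_append_some_none _ hdP] at hd1'
          simp only [Option.some.injEq, Prod.mk.injEq] at hd1'
          obtain ⟨he1, he2, he3⟩ := hd1'
          have hyh1 : y ∉ h1 := by
            intro hmem
            rw [if_pos hmem] at he3
            cases he3
          have hbound := dSpec_bounds hdP
          rw [if_pos (by
            refine ⟨rfl, ?_⟩
            intro hc
            have hc' : P.length = s1 := by exact_mod_cast hc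
            omega)]
          constructor
          · intro x
            by_cases hxy : x = y
            · rw [hxy, PySem.Dict.get?_insert_self]
              rw [dSpec_append_some_none _ hdP, if_pos (by simp)]
              simp [castv, he1, he2]
            · rw [PySem.Dict.get?_insert_of_ne _ _ hxy, hget x, dSpec_snoc_ne hxy]
          · exact PySem.Dict.nodup_keys_insert _ _ _ hnd
    | some s2 =>
      have hys : d.get? y = some ((s1 : Int), (p1 : Int), some (s2 : Int)) := by rw [hy, hd1]; rfl
      rw [dstep_some hys]
      rw [if_neg (by rintro ⟨hc, -⟩; cases hc)]
      constructor
      · intro x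
        by_cases hxy : x = y
        · rw [hxy, hy]
          cases hdP : dSpecFrom 0 P y with
          | none =>
            rw [dSpec_append_none _ hdP] at hd1
            by_cases hyh : y ∈ h1
            · rw [if_pos hyh] at hd1
              simp at hd1
            · rw [if_neg hyh] at hd1
              cases hd1
          | some r' =>
            obtain ⟨s1', p1', s2o'⟩ := r'
            cases s2o' with
            | none =>
              have hd1' := hd1
              rw [dSpec_append_some_none _ hdP] at hd1'
              simp only [Option.some.injEq, Prod.mk.injEq] at hd1'
              obtain ⟨he1, he2, he3⟩ := hd1'
              have hyh : y ∈ h1 := by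
                by_contra hmem
                rw [if_neg hmem] at he3
                cases he3
              rw [if_pos hyh] at he3
              have he3' : 0 + P.length = s2 := Option.some.inj he3
              rw [hd1, dSpec_append_some_none (h1 ++ [y]) hdP, if_pos (by simp [hyh])]
              rw [he1, he2, he3']
            | some s2'' =>
              have hd1' := hd1
              rw [dSpec_append_some_some _ hdP] at hd1'
              rw [hd1, dSpec_append_some_some (h1 ++ [y]) hdP, hd1']
        · rw [hget x, dSpec_snoc_ne hxy]
      · exact hnd

lemma inner_loop (rest : List Int) : ∀ (h1 : List Int) (P : List (List Int))
    (d : PySem.Dict Int (Int × Int × Option Int)), Good (P ++ [h1]) d →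
    Good (P ++ [h1 ++ rest])
      ((PySem.List.enumerate rest (h1.length : Int)).foldl
        (fun d q => dstep d (P.length : Int) q.1 q.2) d) := by
  induction rest with
  | nil =>
    intro h1 P d hg
    simpa using hg
  | cons y rest' ih =>
    intro h1 P d hg
    rw [PySem.List.enumerate_cons, List.foldl_cons]
    have hstep := good_step P h1 y d hg
    have hcast : (h1.length : Int) + 1 = (((h1 ++ [y]).length : Nat) : Int) := by simp
    rw [hcast]
    have := ih (h1 ++ [y]) P _ hstep
    simpa [List.append_assoc] using this

lemma outer_loop (rest : List (List Int)) : ∀ (P : List (List Int))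
    (d : PySem.Dict Int (Int × Int × Option Int)), Good P d →
    Good (P ++ rest)
      ((PySem.List.enumerate rest (P.length : Int)).foldl
        (fun d p => (PySem.List.enumerate p.2 0).foldl (fun d q => dstep d p.1 q.1 q.2) d) d) := by
  induction rest with
  | nil =>
    intro P d hg
    simpa using hg
  | cons h rest' ih =>
    intro P d hg
    rw [PySem.List.enumerate_cons, List.foldl_cons]
    have h0 : Good (P ++ [([] : List Int)]) d := by
      refine ⟨fun x => ?_, hg.2⟩
      rw [hg.1 x, dSpec_snoc_nil]
    have h1 : Good (P ++ [h])
        ((PySem.List.enumerate h (0 : Int)).foldl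
          (fun d q => dstep d (P.length : Int) q.1 q.2) d) := by
      have := inner_loop h [] P d h0
      simpa using this
    have hcast : (P.length : Int) + 1 = (((P ++ [h]).length : Nat) : Int) := by simp
    rw [hcast]
    have := ih (P ++ [h]) _ h1
    simpa [List.append_assoc] using this

lemma Binfo_eq (data : List (List Int)) :
    Binfo data = (PySem.List.enumerate data (0 : Int)).foldl
      (fun d p => (PySem.List.enumerate p.2 0).foldl (fun d q => dstep d p.1 q.1 q.2) d)
      PySem.Dict.empty := rfl

lemma good_data (data : List (List Int)) : Good data (Binfo data) := by
  have hbase : Good [] PySem.Dict.empty := by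
    refine ⟨fun x => ?_, PySem.Dict.nodup_keys_empty⟩
    simp [PySem.Dict.get?_empty, dSpecFrom]
  have := outer_loop data [] PySem.Dict.empty hbase
  rw [Binfo_eq]
  simpa using this

lemma dSpec_eq_some_iff {l : List (List Int)} {a : Nat} {x : Int} {s1 p1 : Nat} {s2o : Option Nat} :
    dSpecFrom a l x = some (s1, p1, s2o) ↔
      ∃ iN, iN < l.length ∧ s1 = a + iN ∧ x ∈ l.getD iN [] ∧ (∀ j < iN, x ∉ l.getD j []) ∧
        p1 = pos1 x (l.getD iN []) ∧ s2o = findC (a + iN + 1) (l.drop (iN + 1)) x := by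
  induction l generalizing a with
  | nil => simp [dSpecFrom]
  | cons h t ih =>
    simp only [dSpecFrom]
    by_cases hx : x ∈ h
    · rw [if_pos hx]
      constructor
      · intro he
        simp only [Option.some.injEq, Prod.mk.injEq] at he
        obtain ⟨h1, h2, h3⟩ := he
        refine ⟨0, by simp, by omega, by simpa using hx, by omega, ?_, ?_⟩
        · rw [← h2]; simp
        · rw [← h3]; rfl
      · rintro ⟨iN, h1, h2, h3, h4, h5, h6⟩
        match iN with
        | 0 =>
          simp only [List.getD_cons_zero] at h5
          simp only [List.drop_succ_cons, List.drop_zero] at h6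
          rw [h2, h5, h6]; rfl
        | iN + 1 => exact absurd (by simpa using hx) (h4 0 (by omega))
    · rw [if_neg hx, ih]
      constructor
      · rintro ⟨iN, h1, h2, h3, h4, h5, h6⟩
        refine ⟨iN + 1, by simpa using h1, by omega, by simpa [List.getD_cons_succ] using h3, ?_,
          by simpa [List.getD_cons_succ] using h5, ?_⟩
        · intro j hj
          match j with
          | 0 => simpa using hx
          | j + 1 =>
            rw [List.getD_cons_succ]
            exact h4 j (by omega)
        · rw [List.drop_succ_cons]
          rw [h6]
          congr 1
          omega
      · rintro ⟨iN, h1, h2, h3, h4, h5, h6⟩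
        match iN with
        | 0 => exact absurd (by simpa using h3) hx
        | iN + 1 =>
          refine ⟨iN, by simpa using h1, by omega, by simpa [List.getD_cons_succ] using h3, ?_,
            by simpa [List.getD_cons_succ] using h5, ?_⟩
          · intro j hj
            have := h4 (j + 1) (by omega)
            rwa [List.getD_cons_succ] at this
          · rw [List.drop_succ_cons] at h6
            rw [h6]
            congr 1
            omega

lemma getD_drop_list (data : List (List Int)) (m j : Nat) :
    (data.drop m).getD j [] = data.getD (m + j) [] := by
  simp [List.getD_eq_getElem?_getD, List.getElem?_drop]

lemma dSpec_some_iff {data : List (List Int)} {x : Int} {s1 p1 s2 : Nat} :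
    dSpecFrom 0 data x = some (s1, p1, some s2) ↔ CandAt data s1 s2 p1 x := by
  rw [dSpec_eq_some_iff]
  unfold CandAt
  constructor
  · rintro ⟨iN, h1, h2, h3, h4, h5, h6⟩
    have hs1 : s1 = iN := by omega
    subst hs1
    obtain ⟨kN, hk1, hk2, hk3, hk4⟩ := findC_some_iff.mp h6.symm
    rw [List.length_drop] at hk1
    rw [getD_drop_list] at hk2
    have hs2 : s2 = s1 + 1 + kN := by omega
    obtain ⟨hp1, hp2, hp3⟩ := pos1_spec h3
    refine ⟨by omega, by omega, by rw [h5]; exact hp1, by rw [h5]; exact hp2, ?_, h4, ?_, ?_⟩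
    · rw [hs2]; exact hk2
    · intro k' hka hkb
      have hj := hk3 (k' - s1 - 1) (by omega)
      rw [getD_drop_list] at hj
      have harith : s1 + 1 + (k' - s1 - 1) = k' := by omega
      rwa [harith] at hj
    · intro p' hp'
      rw [h5] at hp'
      exact hp3 p' hp'
  · rintro ⟨h1, h2, h3, h4, h5, h6, h7, h8⟩
    refine ⟨s1, by omega, by omega, mem_iff_getD.mpr ⟨p1, h3, h4⟩, h6, (pos1_eq h3 h4 h8).symm, ?_⟩
    symm
    rw [findC_some_iff]
    refine ⟨s2 - s1 - 1, ?_, ?_, ?_, by omega⟩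
    · rw [List.length_drop]; omega
    · rw [getD_drop_list]
      have harith : s1 + 1 + (s2 - s1 - 1) = s2 := by omega
      rw [harith]
      exact h5
    · intro j hj
      rw [getD_drop_list]
      exact h7 (s1 + 1 + j) (by omega) (by omega)

lemma matchfn_some {r : Int × Int × Int × Option Int} {t : Int × Int × Int × Int} :
    (match r with
      | (x, (s1, p1, some s2)) => some ((s1, s2, p1, x) : Int × Int × Int × Int)
      | _ => none) = some t ↔
      ∃ x s1 p1 s2 : Int, r = (x, (s1, p1, some s2)) ∧ t = (s1, s2, p1, x) := by
  obtain ⟨x, s1, p1, s2o⟩ := r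
  cases s2o with
  | none => simp
  | some s2 =>
    constructor
    · intro h
      exact ⟨x, s1, p1, s2, rfl, (Option.some.inj h).symm⟩
    · rintro ⟨x', s1', p1', s2', he, rfl⟩
      simp only [Prod.mk.injEq, Option.some.injEq] at he
      obtain ⟨rfl, rfl, rfl, rfl⟩ := he
      rfl

lemma cands_mem_iff {data : List (List Int)} {t : Int × Int × Int × Int} :
    t ∈ Bcands data ↔ ∃ s1 s2 p1 : Nat, ∃ x : Int,
      CandAt data s1 s2 p1 x ∧ t = ((s1 : Int), (s2 : Int), (p1 : Int), x) := by
  unfold Bcands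
  rw [List.mem_filterMap]
  constructor
  · rintro ⟨r, hr, hfn⟩
    obtain ⟨x, s1I, p1I, s2I, rfl, rfl⟩ := matchfn_some.mp hfn
    have hget : (Binfo data).get? x = some (s1I, p1I, some s2I) :=
      (PySem.Dict.get?_eq_some_iff_mem_items _ _ _ (good_data data).2).mpr hr
    rw [(good_data data).1 x] at hget
    cases hd : dSpecFrom 0 data x with
    | none => rw [hd] at hget; cases hget
    | some r' =>
      obtain ⟨s1, p1, s2o⟩ := r'
      rw [hd] at hget
      simp only [Option.map_some, castv, Option.some.injEq, Prod.mk.injEq] at hget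
      obtain ⟨h1, h2, h3⟩ := hget
      cases s2o with
      | none => simp at h3
      | some s2 =>
        have h3' : (s2 : Int) = s2I := by simpa using h3
        exact ⟨s1, s2, p1, x, dSpec_some_iff.mp hd, by rw [← h1, ← h2, ← h3']⟩
  · rintro ⟨s1, s2, p1, x, hcand, rfl⟩
    have hd := dSpec_some_iff.mpr hcand
    refine ⟨(x, ((s1 : Int), (p1 : Int), some (s2 : Int))), ?_, rfl⟩
    apply (PySem.Dict.get?_eq_some_iff_mem_items _ _ _ (good_data data).2).mp
    rw [(good_data data).1 x, hd]
    simp [castv]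

lemma cands_nodup (data : List (List Int)) : (Bcands data).Nodup := by
  have hknd := (good_data data).2
  have hpw : (Binfo data).items.Pairwise (fun r r' => r.1 ≠ r'.1) := by
    have hknd' : ((Binfo data).items.map (fun p => p.1)).Pairwise (fun a b => a ≠ b) := hknd
    rw [List.pairwise_map] at hknd'
    exact hknd'
  unfold Bcands
  rw [List.Nodup, List.pairwise_filterMap]
  refine hpw.imp ?_
  intro r r' hne b hb b' hb'
  obtain ⟨x, s1, p1, s2, he, rfl⟩ := matchfn_some.mp hb
  obtain ⟨x', s1', p1', s2', he', rfl⟩ := matchfn_some.mp hb'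
  intro hbe
  apply hne
  rw [he, he']
  have hx : x = x' := (Prod.ext_iff.mp (Prod.ext_iff.mp (Prod.ext_iff.mp hbe).2).2).2
  rw [hx]

/- ---------- assembly ---------- -/

def castEv : Ev → Int × Int × Int × Int
  | ((i, k, p), (x, _)) => ((i : Int), (k : Int), (p : Int), x)

lemma bkey_lt_of_kLtb {e e' : Ev} (h : kLtb e.1 e'.1 = true) :
    bkey (castEv e) < bkey (castEv e') := by
  obtain ⟨⟨i, k, p⟩, x, B⟩ := e
  obtain ⟨⟨i', k', p'⟩, x', B'⟩ := e'
  have h' : i < i' ∨ (i = i' ∧ (k < k' ∨ (k = k' ∧ p < p'))) := by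
    rw [kLtb_iff] at h
    exact h
  show bkey ((i : Int), (k : Int), (p : Int), x) < bkey ((i' : Int), (k' : Int), (p' : Int), x')
  unfold bkey
  rw [Prod.Lex.lt_iff]
  simp only [ofLex_toLex]
  rcases h' with hlt1 | ⟨rfl, h2⟩
  · exact Or.inl (show (i : Int) < (i' : Int) by exact_mod_cast hlt1)
  · refine Or.inr ⟨rfl, ?_⟩
    rw [Prod.Lex.lt_iff]
    simp only [ofLex_toLex]
    rcases h2 with hlt2 | ⟨rfl, hlt3⟩
    · exact Or.inl (show (k : Int) < (k' : Int) by exact_mod_cast hlt2)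
    · exact Or.inr ⟨rfl, show (p : Int) < (p' : Int) by exact_mod_cast hlt3⟩

lemma sorted_cands (data : List (List Int)) :
    PySem.List.sorted (Bcands data) bkey false =
      ((evsFrom 0 data).filter (fhb (evsFrom 0 data))).map castEv := by
  have hpwL : (((evsFrom 0 data).filter (fhb (evsFrom 0 data))).map castEv).Pairwise
      (fun a b => bkey a < bkey b) := by
    rw [List.pairwise_map]
    exact ((pw_evsFrom 0 data).filter _).imp (fun h => bkey_lt_of_kLtb h)
  have hnodupL : (((evsFrom 0 data).filter (fhb (evsFrom 0 data))).map castEv).Nodup :=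
    hpwL.imp (fun hlt heq => absurd (heq ▸ hlt) (lt_irrefl _))
  have hmem : ∀ t, t ∈ ((evsFrom 0 data).filter (fhb (evsFrom 0 data))).map castEv ↔
      t ∈ Bcands data := by
    intro t
    rw [List.mem_map, cands_mem_iff]
    constructor
    · rintro ⟨e, he, rfl⟩
      obtain ⟨i, k, p, x, hcand, rfl⟩ := mem_filter_fhb.mp he
      exact ⟨i, k, p, x, hcand, rfl⟩
    · rintro ⟨s1, s2, p1, x, hcand, rfl⟩
      exact ⟨((s1, s2, p1), (x, data.getD s2 [])), mem_filter_fhb.mpr ⟨s1, s2, p1, x, hcand, rfl⟩, rfl⟩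
  have hperm : (((evsFrom 0 data).filter (fhb (evsFrom 0 data))).map castEv).Perm (Bcands data) :=
    (List.perm_ext_iff_of_nodup hnodupL (cands_nodup data)).mpr hmem
  exact PySem.List.sorted_eq_of_perm_of_pairwise_lt _ _ bkey hperm hpwL

theorem A_eq_B (data : List (List Int)) : find_same_element data = find_same_element_alt data := by
  rw [A_eq_rows, rows_eq_F data 0 [], F_eq_hits,
    hits_eq_filter (evsFrom 0 data) (pw_evsFrom 0 data)]
  rw [altB_unfold, sorted_cands, List.map_map]
  apply List.map_congr_left
  intro e he
  obtain ⟨⟨i, k, p⟩, x, B⟩ := e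
  rfl

-- ===== VERDICT (by name: the statement is the Claim_ definition above) =====
theorem find_same_element_spec : Claim_equal_find_same_element := by
  intro data _
  unfold Spec_find_same_element
  exact A_eq_B data
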